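-- pv_equiv track=rewrite | github.com/iitis/railways_dispatching_silesia | data_formatting/data_formatting/make_switch_set.py | block_indices_to_interprete_switches
-- ===== SOURCE A (Python) =====
-- def block_indices_to_interprete_switches(data_path_check, previous_block, next_block):
--
--     i = 0
--     j = 0
--     list_pos_previous_block = []
--     list_pos_next_block = []
--     for el in data_path_check['previous_block']:
--         if el == previous_block:
--             list_pos_previous_block.append(i)
--         if el == next_block:
--             list_pos_next_block.append(i)
--         i+= 1
--
--     for el in data_path_check['next_block']:
--         if el == previous_block:
--             list_pos_previous_block.append(j)
--         if el == next_block: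
--             list_pos_next_block.append(j)
--         j+= 1
--
--     return list_pos_previous_block, list_pos_next_block
-- ===== SOURCE B (Python) =====
-- def block_indices_to_interprete_switches(data_path_check, previous_block, next_block):
--     # Build one value->positions index over both lists, then answer by two lookups.
--     index = {}
--     for lst in (data_path_check['previous_block'], data_path_check['next_block']):
--         for pos, el in enumerate(lst):
--             index.setdefault(el, []).append(pos)
--     return index.get(previous_block, []), index.get(next_block, [])
-- ===== Notes on version B (the rewrite author's own statement) =====
-- stated objective: alternative
-- what changed: Instead of testing each element against the two targets while scanning, B builds a dict mapping every value to its list of positions (one setdefault/append pass over both lists) and answers with two dict lookups.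
import Mathlib
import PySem

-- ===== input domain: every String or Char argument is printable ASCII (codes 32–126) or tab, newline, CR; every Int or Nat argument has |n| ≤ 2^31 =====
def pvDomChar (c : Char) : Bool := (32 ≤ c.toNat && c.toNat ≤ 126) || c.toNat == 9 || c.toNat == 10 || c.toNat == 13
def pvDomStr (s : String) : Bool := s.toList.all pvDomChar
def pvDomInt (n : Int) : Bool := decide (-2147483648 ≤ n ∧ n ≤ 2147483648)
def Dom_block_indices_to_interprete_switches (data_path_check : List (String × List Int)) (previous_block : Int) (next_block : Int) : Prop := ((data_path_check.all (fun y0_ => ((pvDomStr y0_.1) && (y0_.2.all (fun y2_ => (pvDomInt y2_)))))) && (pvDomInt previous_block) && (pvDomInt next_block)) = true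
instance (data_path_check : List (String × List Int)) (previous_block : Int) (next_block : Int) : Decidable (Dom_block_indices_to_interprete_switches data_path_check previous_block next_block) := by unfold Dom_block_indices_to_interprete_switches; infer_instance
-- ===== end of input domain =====

-- B replaces A's two target-testing loops with a dict mapping every value to its position
-- list, built in one setdefault/append pass over both lists, then two lookups; objective: alternative.


-- ===== PORT A =====
def block_indices_to_interprete_switches (data_path_check : List (String × List Int)) (previous_block : Int) (next_block : Int) : List Int × List Int :=
  match (PySem.Dict.mk data_path_check).get? "previous_block",
        (PySem.Dict.mk data_path_check).get? "next_block" with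
  | some prevL, some nextL =>
    -- first loop: counter i, two conditional appends
    let s1 := prevL.foldl
      (fun (st : Int × List Int × List Int) el =>
        (st.1 + 1,
         if el == previous_block then st.2.1 ++ [st.1] else st.2.1,
         if el == next_block then st.2.2 ++ [st.1] else st.2.2))
      (0, [], [])
    -- second loop: counter j, continuing the same accumulators
    let s2 := nextL.foldl
      (fun (st : Int × List Int × List Int) el =>
        (st.1 + 1,
         if el == previous_block then st.2.1 ++ [st.1] else st.2.1,
         if el == next_block then st.2.2 ++ [st.1] else st.2.2))
      (0, s1.2.1, s1.2.2)
    (s2.2.1, s2.2.2)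
  | _, _ => ([], [])  -- KeyError in Python; excluded by Pre_

-- ===== PORT B =====
def block_indices_to_interprete_switches_alt (data_path_check : List (String × List Int)) (previous_block : Int) (next_block : Int) : List Int × List Int :=
  match (PySem.Dict.mk data_path_check).get? "previous_block" with
  | none => ([], [])  -- KeyError in Python; excluded by Pre_
  | some prevL =>
    match (PySem.Dict.mk data_path_check).get? "next_block" with
    | none => ([], [])  -- KeyError in Python; excluded by Pre_
    | some nextL =>
      -- for lst in (prev, next): for pos, el in enumerate(lst): index.setdefault(el, []).append(pos)
      let index := [prevL, nextL].foldl
        (fun (d : PySem.Dict Int (List Int)) lst =>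
          (PySem.List.enumerate lst).foldl
            (fun d q => d.modify q.2 [] (· ++ [q.1])) d)
        PySem.Dict.empty
      (index.getD previous_block [], index.getD next_block [])

-- ===== PRECONDITION & SPEC =====
-- Pre_ excludes exactly the inputs where Python A raises KeyError: a missing
-- 'previous_block' or 'next_block' key.
def Pre_block_indices_to_interprete_switches (data_path_check : List (String × List Int)) (previous_block : Int) (next_block : Int) : Prop :=
  ((PySem.Dict.mk data_path_check).get? "previous_block").isSome = true ∧
  ((PySem.Dict.mk data_path_check).get? "next_block").isSome = true
instance (data_path_check : List (String × List Int)) (previous_block : Int) (next_block : Int) : Decidable (Pre_block_indices_to_interprete_switches data_path_check previous_block next_block) := by unfold Pre_block_indices_to_interprete_switches; infer_instance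

def pvWitness_block_indices_to_interprete_switches : (List (String × List Int)) × Int × Int :=
  ([("previous_block", [1, 2, 1]), ("next_block", [2])], 1, 2)

def Spec_block_indices_to_interprete_switches (data_path_check : List (String × List Int)) (previous_block : Int) (next_block : Int) (out : List Int × List Int) : Prop := out = block_indices_to_interprete_switches_alt data_path_check previous_block next_block
instance (data_path_check : List (String × List Int)) (previous_block : Int) (next_block : Int) (out : List Int × List Int) : Decidable (Spec_block_indices_to_interprete_switches data_path_check previous_block next_block out) := by unfold Spec_block_indices_to_interprete_switches; infer_instance

-- ===== CLAIM (what is proved, stated in full; the proofs are below) =====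
def Claim_equal_block_indices_to_interprete_switches : Prop := ∀ (data_path_check : List (String × List Int)) (previous_block : Int) (next_block : Int), Dom_block_indices_to_interprete_switches data_path_check previous_block next_block → Pre_block_indices_to_interprete_switches data_path_check previous_block next_block → Spec_block_indices_to_interprete_switches data_path_check previous_block next_block (block_indices_to_interprete_switches data_path_check previous_block next_block)

-- ===== LEMMAS AND PROOFS =====

-- A's loop body, factored for the lemma below.
def pvStepA (p n : Int) (st : Int × List Int × List Int) (el : Int) : Int × List Int × List Int :=
  (st.1 + 1,
   if el == p then st.2.1 ++ [st.1] else st.2.1,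
   if el == n then st.2.2 ++ [st.1] else st.2.2)

-- positions of t in xs, with counter starting at s (what A's counter produces)
def pvPosFrom (t : Int) (xs : List Int) (s : Int) : List Int :=
  ((PySem.List.enumerate xs s).filter (fun q => q.2 == t)).map (·.1)

lemma loopA_eq (p n : Int) (xs : List Int) : ∀ (i : Int) (lp ln : List Int),
    xs.foldl (pvStepA p n) (i, lp, ln)
      = (i + xs.length, lp ++ pvPosFrom p xs i, ln ++ pvPosFrom n xs i) := by
  induction xs with
  | nil => intro i lp ln; simp [pvPosFrom, PySem.List.enumerate_nil]
  | cons x xs ih =>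
    intro i lp ln
    simp only [List.foldl_cons, pvStepA, ih]
    simp only [pvPosFrom, PySem.List.enumerate_cons, List.filter_cons]
    by_cases hp : x == p <;> by_cases hn : x == n <;>
      simp [hp, hn, Prod.ext_iff, List.append_assoc] <;> omega

-- B's inner loop: folding one enumerated list into the index dict appends that
-- list's positions of t to the existing entry for t.
lemma loopB_eq (xs : List Int) : ∀ (s : Int) (d : PySem.Dict Int (List Int)) (t : Int),
    ((PySem.List.enumerate xs s).foldl (fun d q => d.modify q.2 [] (· ++ [q.1])) d).getD t []
      = d.getD t [] ++ pvPosFrom t xs s := by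
  induction xs with
  | nil => intro s d t; simp [pvPosFrom, PySem.List.enumerate_nil]
  | cons x xs ih =>
    intro s d t
    simp only [PySem.List.enumerate_cons, List.foldl_cons, ih]
    simp only [pvPosFrom, PySem.List.enumerate_cons, List.filter_cons]
    by_cases hx : x == t
    · have ht : t = x := (beq_iff_eq.mp hx).symm
      subst ht
      simp [PySem.Dict.getD_modify_self, List.append_assoc]
    · have ht : ¬ t = x := fun h => hx (beq_iff_eq.mpr h.symm)
      simp [PySem.Dict.getD_modify, ht, hx]

theorem block_indices_to_interprete_switches_spec : Claim_equal_block_indices_to_interprete_switches := by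
  intro d p n _ hpre
  unfold Spec_block_indices_to_interprete_switches
  unfold block_indices_to_interprete_switches block_indices_to_interprete_switches_alt
  obtain ⟨h1, h2⟩ := hpre
  obtain ⟨prevL, hp⟩ := Option.isSome_iff_exists.mp h1
  obtain ⟨nextL, hn⟩ := Option.isSome_iff_exists.mp h2
  rw [hp, hn]
  have hf : (fun (st : Int × List Int × List Int) (el : Int) =>
      (st.1 + 1, if el == p then st.2.1 ++ [st.1] else st.2.1,
       if el == n then st.2.2 ++ [st.1] else st.2.2)) = pvStepA p n := rfl
  simp only [hf, loopA_eq, List.foldl_cons, List.foldl_nil, loopB_eq]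
  simp [PySem.Dict.getD, PySem.Dict.empty, PySem.Dict.get?]

-- ===== VERDICT (by name: the statement is the Claim_ definition above) =====
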